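-- pv_equiv track=rewrite | github.com/tamaron1820/CSE415 | a1-starter-code/a1-starter-code/a1.py | triple_vowels
-- ===== SOURCE A (Python) =====
-- def triple_vowels(text):
--     """Return a new version of text, with all the vowels tripled.
--     For example:  "The *BIG BAD* wolf!" => "Theee "BIIIG BAAAD* wooolf!".
--     For this exercise assume the vowels are
--     the characters A,E,I,O, and U (and a,e,i,o, and u).
--     Maintain the case of the characters."""
--     cha_list= list(text)
--     new_list=[]
--     vowel_count=0
--     for i in range(len(cha_list)):
--         if(cha_list[i]=='a'or cha_list[i]=='e'or cha_list[i]=='i'or cha_list[i]=='o'or cha_list[i]=='u'or cha_list[i]=='A'or cha_list[i]=='E'or cha_list[i]=='I'or cha_list[i]=='O'or cha_list[i]=='U'):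
--             j = i+1
--             new_list.insert(2*vowel_count+i,cha_list[i])
--             new_list.insert(2*vowel_count+i+1,cha_list[i])
--             new_list.insert(2*vowel_count+i+2,cha_list[i])
--             vowel_count+=1
--         else:
--             new_list.insert(2*vowel_count+i,cha_list[i])
--     ans_string = "".join(new_list)
--     return ans_string
-- ===== SOURCE B (Python) =====
-- def triple_vowels(text):
--     for v in "aeiouAEIOU":
--         text = text.replace(v, v * 3)
--     return text
-- ===== Notes on version B (the rewrite author's own statement) =====
-- stated objective: idiomatic
-- what changed: A walks the string by index in Python, counting vowels and inserting each character (three copies for a vowel) at computed positions of a growing list; B instead makes ten whole-string replace passes, one per vowel, via text.replace(v, v*3).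
import Mathlib
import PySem

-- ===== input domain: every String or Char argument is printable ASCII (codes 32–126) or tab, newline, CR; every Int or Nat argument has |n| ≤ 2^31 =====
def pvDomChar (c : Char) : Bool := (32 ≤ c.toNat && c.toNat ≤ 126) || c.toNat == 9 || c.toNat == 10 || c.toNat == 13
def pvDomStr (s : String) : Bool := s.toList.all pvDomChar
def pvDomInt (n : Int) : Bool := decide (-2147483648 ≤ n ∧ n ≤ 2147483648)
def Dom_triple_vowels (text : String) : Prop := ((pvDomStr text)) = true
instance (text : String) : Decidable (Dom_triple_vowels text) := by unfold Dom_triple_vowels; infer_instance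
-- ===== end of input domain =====

-- B replaces A's index-walk with inserts by ten whole-string replace passes driven by the vowel table (idiomatic; same asymptotic cost).

-- ===== PORT A =====
-- literal port of A: walk indices 0..len-1, insert each char (three copies for a vowel)
-- at positions 2*vowel_count+i(+1,+2) of new_list, tracking vowel_count
def triple_vowels (text : String) : String :=
  let cha_list := text.toList
  let res := (PySem.List.pyRange 0 (PySem.List.len cha_list) 1).foldl
    (fun (st : List Char × Int) i =>
      let c := PySem.List.pyGetD cha_list i ' '
      if c = 'a' ∨ c = 'e' ∨ c = 'i' ∨ c = 'o' ∨ c = 'u' ∨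
         c = 'A' ∨ c = 'E' ∨ c = 'I' ∨ c = 'O' ∨ c = 'U' then
        let n1 := PySem.List.insert st.1 (2 * st.2 + i) c
        let n2 := PySem.List.insert n1 (2 * st.2 + i + 1) c
        let n3 := PySem.List.insert n2 (2 * st.2 + i + 2) c
        (n3, st.2 + 1)
      else
        (PySem.List.insert st.1 (2 * st.2 + i) c, st.2))
    (([] : List Char), (0 : Int))
  String.ofList res.1

-- ===== PORT B =====
-- port of Source B: for v in "aeiouAEIOU": text = text.replace(v, v*3)
def triple_vowels_alt (text : String) : String :=
  "aeiouAEIOU".toList.foldl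
    (fun t v => PySem.Str.replace t (String.ofList [v]) (String.ofList [v, v, v])) text

-- ===== PRECONDITION & SPEC =====
def Spec_triple_vowels (text : String) (out : String) : Prop := out = triple_vowels_alt text
instance (text : String) (out : String) : Decidable (Spec_triple_vowels text out) := by unfold Spec_triple_vowels; infer_instance

-- ===== CLAIM (what is proved, stated in full; the proofs are below) =====
def Claim_equal_triple_vowels : Prop := ∀ (text : String), Dom_triple_vowels text → Spec_triple_vowels text (triple_vowels text)

-- ===== LEMMAS AND PROOFS =====

-- the common normal form both programs compute: each char of the input becomes one block
def pvBlock (vs : List Char) (c : Char) : List Char := if c ∈ vs then [c, c, c] else [c]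

def pvVowels : List Char := ['a', 'e', 'i', 'o', 'u', 'A', 'E', 'I', 'O', 'U']

-- A's loop body, in closed form over an (index, char) pair (definitionally equal to the port's lambda)
def pvStepA (st : List Char × Int) (p : Int × Char) : List Char × Int :=
  if p.2 = 'a' ∨ p.2 = 'e' ∨ p.2 = 'i' ∨ p.2 = 'o' ∨ p.2 = 'u' ∨
     p.2 = 'A' ∨ p.2 = 'E' ∨ p.2 = 'I' ∨ p.2 = 'O' ∨ p.2 = 'U' then
    (PySem.List.insert (PySem.List.insert (PySem.List.insert st.1 (2 * st.2 + p.1) p.2)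
        (2 * st.2 + p.1 + 1) p.2) (2 * st.2 + p.1 + 2) p.2, st.2 + 1)
  else
    (PySem.List.insert st.1 (2 * st.2 + p.1) p.2, st.2)

-- python list.insert at index = length appends
theorem pv_insert_at_length (xs : List Char) (c : Char) (i : Int) (h : i = (xs.length : Int)) :
    PySem.List.insert xs i c = xs ++ [c] := by
  subst h
  have h0 : ¬((xs.length : Int) < 0) := by omega
  simp [PySem.List.insert, PySem.List.sliceIndices, h0]

theorem pvStepA_eq (acc : List Char) (vc s : Nat) (c : Char) (h : acc.length = s + 2 * vc) :
    pvStepA (acc, (vc : Int)) ((s : Int), c) =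
      (acc ++ pvBlock pvVowels c, ((vc + if c ∈ pvVowels then 1 else 0 : Nat) : Int)) := by
  unfold pvStepA
  by_cases hc : c ∈ pvVowels
  · have hv : c = 'a' ∨ c = 'e' ∨ c = 'i' ∨ c = 'o' ∨ c = 'u' ∨
        c = 'A' ∨ c = 'E' ∨ c = 'I' ∨ c = 'O' ∨ c = 'U' := by
      simpa [pvVowels] using hc
    simp only [hv, if_true]
    rw [pv_insert_at_length acc c _ (by omega)]
    rw [pv_insert_at_length _ c _ (by simp; omega)]
    rw [pv_insert_at_length _ c _ (by simp; omega)]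
    simp [pvBlock, hc]
  · have hv : ¬(c = 'a' ∨ c = 'e' ∨ c = 'i' ∨ c = 'o' ∨ c = 'u' ∨
        c = 'A' ∨ c = 'E' ∨ c = 'I' ∨ c = 'O' ∨ c = 'U') := by
      simpa [pvVowels] using hc
    simp only [hv, if_false]
    rw [pv_insert_at_length acc c _ (by omega)]
    simp [pvBlock, hc]

-- A's loop appends one pvBlock per character of the enumerated suffix
theorem pvA_loop (l : List Char) (s vc : Nat) (acc : List Char)
    (h : acc.length = s + 2 * vc) :
    ((PySem.List.enumerate l (s : Int)).foldl pvStepA (acc, (vc : Int))).1 =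
      acc ++ l.flatMap (pvBlock pvVowels) := by
  induction l generalizing s vc acc with
  | nil => simp [PySem.List.enumerate_nil]
  | cons c t ih =>
    rw [PySem.List.enumerate_cons, List.foldl_cons, pvStepA_eq acc vc s c h]
    rw [show ((s : Int) + 1) = ((s + 1 : Nat) : Int) by push_cast; ring]
    rw [ih (s + 1) (vc + if c ∈ pvVowels then 1 else 0) _
      (by by_cases hc : c ∈ pvVowels <;> simp [pvBlock, hc, h] <;> omega)]
    simp

-- A computes the normal form
theorem pvA_eq (text : String) :
    triple_vowels text = String.ofList (text.toList.flatMap (pvBlock pvVowels)) := by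
  unfold triple_vowels
  show String.ofList (((PySem.List.pyRange 0 (PySem.List.len text.toList) 1).foldl
      (fun st i => pvStepA st (i, PySem.List.pyGetD text.toList i ' '))
      (([] : List Char), (0 : Int))).1) = _
  rw [← List.foldl_map (f := fun j => (j, PySem.List.pyGetD text.toList j ' ')) (g := pvStepA),
    ← PySem.List.enumerate_eq_map_pyRange text.toList ' ']
  rw [show ((0 : Int)) = ((0 : Nat) : Int) by norm_num]
  rw [pvA_loop text.toList 0 0 [] rfl]
  simp

-- replacing a single character is a per-character flatMap
theorem pv_replace_go_single (v : Char) (new : List Char) :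
    ∀ (l : List Char) (fuel : Nat) (acc : List Char), l.length ≤ fuel →
    PySem.Chars.replace.go [v] new fuel l acc =
      acc.reverse ++ l.flatMap (fun c => if c = v then new else [c]) := by
  intro l
  induction l with
  | nil => intro fuel acc _; cases fuel <;> simp [PySem.Chars.replace.go]
  | cons c t ih =>
    intro fuel acc hf
    cases fuel with
    | zero => simp at hf
    | succ f =>
      rw [PySem.Chars.replace.go]
      by_cases hc : c = v
      · subst hc
        have hp : List.isPrefixOf [c] (c :: t) = true := by simp [List.isPrefixOf]
        rw [if_pos hp]
        have hd : List.drop (List.length [c]) (c :: t) = t := rfl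
        rw [hd, ih f (new.reverse ++ acc) (by simpa using Nat.le_of_succ_le_succ hf)]
        simp
      · have hp : List.isPrefixOf [v] (c :: t) = false := by
          simp [List.isPrefixOf]
          exact fun h => absurd h.symm hc
        rw [hp]
        simp only [Bool.false_eq_true, if_false]
        rw [ih f (c :: acc) (by simpa using Nat.le_of_succ_le_succ hf)]
        simp [hc]

theorem pv_replace_single (s : List Char) (v : Char) (new : List Char) :
    PySem.Chars.replace s [v] new = s.flatMap (fun c => if c = v then new else [c]) := by
  rw [PySem.Chars.replace]
  simp only [List.isEmpty_cons, Bool.false_eq_true, if_false]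
  exact pv_replace_go_single v new s s.length [] le_rfl

-- one replace pass moves one vowel from "todo" to "done" in the normal form
theorem pv_pass (s0 : List Char) (done : List Char) (v : Char) (hv : v ∉ done) :
    PySem.Chars.replace (s0.flatMap (pvBlock done)) [v] [v, v, v] =
      s0.flatMap (pvBlock (done ++ [v])) := by
  rw [pv_replace_single, List.flatMap_assoc]
  congr 1
  funext c
  by_cases hc : c ∈ done
  · have hnv : c ≠ v := fun h => hv (h ▸ hc)
    simp [pvBlock, hc, hnv]
  · by_cases hcv : c = v
    · subst hcv; simp [pvBlock, hc]
    · simp [pvBlock, hc, hcv]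

-- B's fold over any nodup vowel list disjoint from "done", at the Chars level
theorem pvB_loop (vs : List Char) : ∀ (done : List Char) (s0 : List Char),
    vs.Nodup → (∀ v ∈ vs, v ∉ done) →
    (vs.foldl (fun t v => PySem.Chars.replace t [v] [v, v, v]) (s0.flatMap (pvBlock done))) =
      s0.flatMap (pvBlock (done ++ vs)) := by
  induction vs with
  | nil => intro done s0 _ _; simp
  | cons v t ih =>
    intro done s0 hnd hdisj
    rw [List.foldl_cons, pv_pass s0 done v (hdisj v List.mem_cons_self)]
    rw [ih (done ++ [v]) s0 hnd.of_cons]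
    · simp
    · intro w hw
      simp only [List.mem_append, List.mem_singleton]
      rintro (h | rfl)
      · exact hdisj w (List.mem_cons_of_mem _ hw) h
      · exact (List.nodup_cons.mp hnd).1 hw

-- the String-level fold computes the Chars-level fold
theorem pv_fold_toList (vs : List Char) : ∀ (t : String),
    (vs.foldl (fun t v => PySem.Str.replace t (String.ofList [v]) (String.ofList [v, v, v])) t).toList
      = vs.foldl (fun l v => PySem.Chars.replace l [v] [v, v, v]) t.toList := by
  induction vs with
  | nil => intro t; simp
  | cons v t ih =>
    intro s
    rw [List.foldl_cons, List.foldl_cons, ih, PySem.Str.toList_replace]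
    simp

-- B computes the same normal form
theorem pvB_eq (text : String) :
    triple_vowels_alt text = String.ofList (text.toList.flatMap (pvBlock pvVowels)) := by
  apply String.toList_inj.mp
  unfold triple_vowels_alt
  rw [pv_fold_toList]
  rw [show "aeiouAEIOU".toList = pvVowels by decide]
  have h := pvB_loop pvVowels [] text.toList (by decide) (by simp)
  rw [show pvBlock [] = fun c => [c] by funext c; simp [pvBlock], List.flatMap_singleton'] at h
  rw [h]
  simp

-- ===== VERDICT (by name: the statement is the Claim_ definition above) =====
theorem triple_vowels_spec : Claim_equal_triple_vowels := by
  intro text _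
  unfold Spec_triple_vowels
  rw [pvA_eq, pvB_eq]
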